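-- pv_equiv track=rewrite | github.com/Morrisf/HW3 | Morris_Fuller_1601380_HW3.py | isAlienLanguage
-- ===== SOURCE A (Python) =====
-- def isAlienLanguage(sentence):
--     def isAlienWord(word):
--         if len(word) < 1:
--             return True
--         else:
--             if word[0] == word[-1]:
--                 return isAlienWord(word[1:-1])
--             else:
--                 return False
--     count = 0
--     sentence = sentence.split(" ")
--     for word in sentence:
--         if isAlienWord(word):
--             count += 1
--     if count == len(sentence):
--         return True
--     else:
--         return False
-- ===== SOURCE B (Python) =====
-- def isAlienLanguage(sentence):
--     return all(w == w[::-1] for w in sentence.split(" "))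
-- ===== Notes on version B (the rewrite author's own statement) =====
-- stated objective: idiomatic
-- what changed: Replaced A's per-word recursive two-pointer shrink (word[0]==word[-1] then recurse on word[1:-1]) plus a count-vs-length tally with an idiomatic reverse-and-compare per word (w == w[::-1]) aggregated by all().
import Mathlib
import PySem

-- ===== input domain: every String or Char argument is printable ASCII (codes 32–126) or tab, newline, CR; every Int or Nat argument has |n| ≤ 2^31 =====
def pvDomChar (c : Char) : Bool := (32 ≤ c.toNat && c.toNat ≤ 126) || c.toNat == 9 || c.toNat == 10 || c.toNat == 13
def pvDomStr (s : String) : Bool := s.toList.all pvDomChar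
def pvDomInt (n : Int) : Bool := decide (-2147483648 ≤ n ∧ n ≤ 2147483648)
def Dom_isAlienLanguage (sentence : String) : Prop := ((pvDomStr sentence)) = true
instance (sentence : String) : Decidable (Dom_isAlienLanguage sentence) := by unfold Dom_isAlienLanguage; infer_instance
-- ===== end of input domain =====

-- B replaces A's per-word recursive two-pointer shrink plus count/length bookkeeping with an
-- idiomatic reverse-and-compare per word aggregated by all(); same return value everywhere.

-- ===== PORT A =====
-- inner helper isAlienWord, on the word's code points (Str indexing/slicing is the List form on toList)
def isAlienWordA (w : List Char) : Bool :=
  if _h : w.length < 1 then true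
  else
    if PySem.List.pyGet? w 0 == PySem.List.pyGet? w (-1) then
      isAlienWordA (PySem.List.slice w (some 1) (some (-1)))   -- word[1:-1]
    else false
termination_by w.length
decreasing_by
  have hne : w ≠ [] := by intro h'; simp [h'] at _h
  simp [PySem.List.length_slice, PySem.List.clampIdx, hne]
  omega

def isAlienLanguage (sentence : String) : Bool :=
  let words := PySem.Chars.splitOn sentence.toList " ".toList   -- sentence.split(" ")
  let count : Int := words.foldl (fun count word => if isAlienWordA word then count + 1 else count) 0
  if count = (words.length : Int) then true else false

-- ===== PORT B =====
-- Source B: all(w == w[::-1] for w in sentence.split(" ")); w[::-1] is exact reverse by PySem.Chars.slice?_none_none_neg_one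
def isAlienLanguage_alt (sentence : String) : Bool :=
  (PySem.Chars.splitOn sentence.toList " ".toList).all (fun w => w == w.reverse)

-- ===== PRECONDITION & SPEC =====
def Spec_isAlienLanguage (sentence : String) (out : Bool) : Prop := out = isAlienLanguage_alt sentence
instance (sentence : String) (out : Bool) : Decidable (Spec_isAlienLanguage sentence out) := by unfold Spec_isAlienLanguage; infer_instance

-- ===== CLAIM (what is proved, stated in full; the proofs are below) =====
def Claim_equal_isAlienLanguage : Prop := ∀ (sentence : String), Dom_isAlienLanguage sentence → Spec_isAlienLanguage sentence (isAlienLanguage sentence)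

-- ===== LEMMAS AND PROOFS =====

theorem slice_mid (xs : List Char) (h : xs ≠ []) :
    PySem.List.slice xs (some 1) (some (-1)) = xs.tail.dropLast := by
  simp [PySem.List.slice, PySem.List.clampIdx, h]
  rw [List.dropLast_eq_take]
  cases xs with
  | nil => simp
  | cons a t => simp

-- A's recursive shrink decides exactly "the word is a palindrome"
theorem word_pal_aux : ∀ (n : Nat) (w : List Char), w.length ≤ n →
    isAlienWordA w = decide (w = w.reverse) := by
  intro n
  induction n with
  | zero =>
    intro w hw
    have hnil : w = [] := by cases w <;> simp_all
    subst hnil; simp [isAlienWordA]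
  | succ n ih =>
    intro w hw
    cases w with
    | nil => simp [isAlienWordA]
    | cons a t =>
      cases t using List.reverseRecOn with
      | nil =>
        rw [isAlienWordA]
        rw [dif_neg (by simp : ¬ ([a] : List Char).length < 1)]
        rw [PySem.List.pyGet?_zero_cons, PySem.List.pyGet?_neg_one]
        rw [if_pos (by simp), slice_mid _ (by simp)]
        simp only [List.tail_cons, List.dropLast_nil]
        rw [show isAlienWordA [] = true from by rw [isAlienWordA]; rfl]
        norm_num
      | append_singleton m b _ =>
        have hne : (a :: (m ++ [b])) ≠ [] := by simp
        rw [isAlienWordA]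
        rw [dif_neg (by simp : ¬ (a :: (m ++ [b])).length < 1)]
        rw [slice_mid _ hne]
        have h0 : PySem.List.pyGet? (a :: (m ++ [b])) 0 = some a :=
          PySem.List.pyGet?_zero_cons _ _
        have h1 : PySem.List.pyGet? (a :: (m ++ [b])) (-1) = some b := by
          rw [PySem.List.pyGet?_neg_one, show a :: (m ++ [b]) = (a :: m) ++ [b] from rfl,
            List.getLast?_concat]
        rw [h0, h1]
        have htail : (a :: (m ++ [b])).tail.dropLast = m := by simp
        rw [htail]
        by_cases hab : a = b
        · subst hab
          rw [if_pos (by simp)]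
          rw [ih m (by simp at hw ⊢; omega)]
          apply decide_eq_decide.mpr
          simp [List.reverse_cons, List.reverse_append]
        · rw [if_neg (by simp [hab])]
          symm
          simp only [decide_eq_false_iff_not]
          intro h
          simp [List.reverse_cons, List.reverse_append] at h
          exact absurd h.1 hab

theorem word_pal (w : List Char) : isAlienWordA w = decide (w = w.reverse) :=
  word_pal_aux w.length w le_rfl

theorem foldl_count (p : List Char → Bool) (ws : List (List Char)) (c : Int) :
    ws.foldl (fun c w => if p w then c + 1 else c) c = c + (ws.countP p : Int) := by
  induction ws generalizing c with
  | nil => simp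
  | cons w ws ih =>
    simp only [List.foldl_cons, List.countP_cons, ih]
    split_ifs with h <;> simp <;> try omega

theorem alt_word (w : List Char) : (w == w.reverse) = isAlienWordA w := by
  rw [word_pal, Bool.eq_iff_iff]
  simp

-- ===== VERDICT (by name: the statement is the Claim_ definition above) =====
theorem isAlienLanguage_spec : Claim_equal_isAlienLanguage := by
  intro sentence _
  unfold Spec_isAlienLanguage isAlienLanguage isAlienLanguage_alt
  dsimp only
  rw [foldl_count]
  set ws := PySem.Chars.splitOn sentence.toList " ".toList with hws
  simp only [zero_add]
  by_cases h : (ws.countP isAlienWordA : Int) = (ws.length : Int)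
  · rw [if_pos h]
    symm
    rw [List.all_eq_true]
    intro w hw
    rw [alt_word]
    have hcount : ws.countP isAlienWordA = ws.length := by exact_mod_cast h
    exact (List.countP_eq_length).mp hcount w hw
  · rw [if_neg h]
    symm
    rw [← Bool.not_eq_true]
    intro hall
    apply h
    rw [List.all_eq_true] at hall
    have : ws.countP isAlienWordA = ws.length :=
      (List.countP_eq_length).mpr (fun w hw => by rw [← alt_word w]; exact hall w hw)
    exact_mod_cast this
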